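-- pv_equiv track=rewrite | github.com/zeroyuekun/loan-approval-ai-system | backend/apps/ml_engine/services/geocoding_service.py | _classify_remoteness
-- ===== SOURCE A (Python) =====
-- MAJOR_CITY_RANGES = [
--     (2000, 2234),  # Sydney CBD & inner suburbs
--     (3000, 3207),  # Melbourne CBD & inner suburbs
--     (4000, 4179),  # Brisbane CBD & inner suburbs
--     (5000, 5199),  # Adelaide CBD & inner suburbs
--     (6000, 6199),  # Perth CBD & inner suburbs
--     (2600, 2618),  # Canberra
--     (7000, 7049),  # Hobart CBD
--     (800, 832),  # Darwin CBD
-- ]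
--
-- INNER_REGIONAL_RANGES = [
--     (2250, 2310),  # Central Coast / Hunter NSW
--     (2320, 2490),  # Hunter / Mid-North Coast
--     (2500, 2530),  # Wollongong / Illawarra
--     (3211, 3500),  # Regional VIC (Ballarat, Bendigo)
--     (4205, 4399),  # Gold Coast / Sunshine Coast hinterland
--     (7050, 7199),  # Southern TAS
-- ]
--
-- OUTER_REGIONAL_RANGES = [
--     (2540, 2599),  # South Coast NSW
--     (2700, 2799),  # Western NSW
--     (3501, 3699),  # North-east VIC
--     (4400, 4699),  # Central QLD
--     (5200, 5499),  # Regional SA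
-- ]
--
-- REMOTE_RANGES = [
--     (2830, 2899),  # Far west NSW
--     (4700, 4899),  # North QLD
--     (5500, 5799),  # Remote SA
--     (6200, 6699),  # Regional WA
--     (870, 899),  # Remote NT
-- ]
--
-- VERY_REMOTE_RANGES = [
--     (4900, 4999),  # Far north QLD
--     (5800, 5999),  # Very remote SA
--     (6700, 6999),  # Very remote WA
--     (900, 999),  # Very remote NT
-- ]
--
-- REMOTENESS_FALLBACK = {
--     "NSW": "major_city",
--     "VIC": "major_city",
--     "QLD": "inner_regional",
--     "WA": "inner_regional",
--     "SA": "major_city",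
--     "TAS": "outer_regional",
--     "NT": "remote",
--     "ACT": "major_city",
-- }
--
-- def _classify_remoteness(postcode: str, state: str) -> str:
--     """Classify postcode into ABS ARIA+ remoteness category.
--
--     Checks postcode against known ranges. Falls back to state-level
--     default if postcode is not in any recognised range.
--     """
--     try:
--         pc = int(postcode)
--     except (ValueError, TypeError):
--         return REMOTENESS_FALLBACK.get(state, "inner_regional")
--
--     # Check ranges in order from most to least urban
--     range_map = [
--         (MAJOR_CITY_RANGES, "major_city"),
--         (INNER_REGIONAL_RANGES, "inner_regional"),
--         (OUTER_REGIONAL_RANGES, "outer_regional"),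
--         (REMOTE_RANGES, "remote"),
--         (VERY_REMOTE_RANGES, "very_remote"),
--     ]
--
--     for ranges, category in range_map:
--         for low, high in ranges:
--             if low <= pc <= high:
--                 return category
--
--     # Fallback to state-level estimate
--     return REMOTENESS_FALLBACK.get(state, "inner_regional")
-- ===== SOURCE B (Python) =====
-- import bisect
--
-- # Flat sorted table of (low, high, category); ranges are pairwise disjoint,
-- # so a binary search over the low bounds finds the only candidate interval.
-- _INTERVALS = sorted(
--     [(lo, hi, "major_city") for lo, hi in [
--         (2000, 2234), (3000, 3207), (4000, 4179), (5000, 5199),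
--         (6000, 6199), (2600, 2618), (7000, 7049), (800, 832)]]
--     + [(lo, hi, "inner_regional") for lo, hi in [
--         (2250, 2310), (2320, 2490), (2500, 2530), (3211, 3500),
--         (4205, 4399), (7050, 7199)]]
--     + [(lo, hi, "outer_regional") for lo, hi in [
--         (2540, 2599), (2700, 2799), (3501, 3699), (4400, 4699), (5200, 5499)]]
--     + [(lo, hi, "remote") for lo, hi in [
--         (2830, 2899), (4700, 4899), (5500, 5799), (6200, 6699), (870, 899)]]
--     + [(lo, hi, "very_remote") for lo, hi in [
--         (4900, 4999), (5800, 5999), (6700, 6999), (900, 999)]]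
-- )
--
-- _LOWS = [lo for lo, _, _ in _INTERVALS]
--
-- _FALLBACK = {
--     "NSW": "major_city",
--     "VIC": "major_city",
--     "QLD": "inner_regional",
--     "WA": "inner_regional",
--     "SA": "major_city",
--     "TAS": "outer_regional",
--     "NT": "remote",
--     "ACT": "major_city",
-- }
--
--
-- def _classify_remoteness(postcode: str, state: str) -> str:
--     try:
--         pc = int(postcode)
--     except (ValueError, TypeError):
--         return _FALLBACK.get(state, "inner_regional")
--     i = bisect.bisect_right(_LOWS, pc)
--     if i > 0:
--         lo, hi, category = _INTERVALS[i - 1]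
--         if pc <= hi:
--             return category
--     return _FALLBACK.get(state, "inner_regional")
-- ===== Notes on version B (the rewrite author's own statement) =====
-- stated objective: alternative
-- what changed: Replaces the nested priority scan over five grouped range lists by a module-level flat sorted (low, high, category) table queried with one bisect_right binary search (the intervals are pairwise disjoint, so the single candidate interval decides the category).
import Mathlib
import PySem

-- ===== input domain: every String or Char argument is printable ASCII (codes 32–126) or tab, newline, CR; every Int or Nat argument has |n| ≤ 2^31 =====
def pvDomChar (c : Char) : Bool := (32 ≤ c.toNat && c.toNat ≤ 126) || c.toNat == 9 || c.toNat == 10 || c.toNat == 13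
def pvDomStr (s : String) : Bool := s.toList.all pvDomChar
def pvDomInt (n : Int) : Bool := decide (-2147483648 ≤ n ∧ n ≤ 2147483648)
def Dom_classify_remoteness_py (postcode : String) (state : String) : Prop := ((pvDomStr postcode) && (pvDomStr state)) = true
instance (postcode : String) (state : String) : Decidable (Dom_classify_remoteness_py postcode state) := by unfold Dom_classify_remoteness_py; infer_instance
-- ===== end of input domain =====

-- B replaces A's nested priority scan over five grouped range lists by a single flat
-- sorted interval table with a binary search (bisect_right) — objective: alternative/idiomatic.

-- ===== PORT A =====

def aMajorCity : List (Int × Int) :=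
  [(2000, 2234), (3000, 3207), (4000, 4179), (5000, 5199), (6000, 6199), (2600, 2618), (7000, 7049), (800, 832)]
def aInnerRegional : List (Int × Int) :=
  [(2250, 2310), (2320, 2490), (2500, 2530), (3211, 3500), (4205, 4399), (7050, 7199)]
def aOuterRegional : List (Int × Int) :=
  [(2540, 2599), (2700, 2799), (3501, 3699), (4400, 4699), (5200, 5499)]
def aRemote : List (Int × Int) :=
  [(2830, 2899), (4700, 4899), (5500, 5799), (6200, 6699), (870, 899)]
def aVeryRemote : List (Int × Int) :=
  [(4900, 4999), (5800, 5999), (6700, 6999), (900, 999)]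

def remotenesssFallback : PySem.Dict String String :=
  PySem.Dict.ofList
    [("NSW", "major_city"), ("VIC", "major_city"), ("QLD", "inner_regional"),
     ("WA", "inner_regional"), ("SA", "major_city"), ("TAS", "outer_regional"),
     ("NT", "remote"), ("ACT", "major_city")]

-- inner 'for low, high in ranges: if low <= pc <= high: return category'
def aInRanges (pc : Int) : List (Int × Int) → Bool
  | [] => false
  | (low, high) :: rest => if low ≤ pc ∧ pc ≤ high then true else aInRanges pc rest

-- outer 'for ranges, category in range_map: …' with early return
def aScan (pc : Int) : List (List (Int × Int) × String) → Option String
  | [] => none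
  | (ranges, category) :: rest =>
      if aInRanges pc ranges then some category else aScan pc rest

def classify_remoteness_py (postcode : String) (state : String) : String :=
  match PySem.Int.ofStr? postcode with
  | none => remotenesssFallback.getD state "inner_regional"   -- except ValueError
  | some pc =>
      match aScan pc
        [(aMajorCity, "major_city"), (aInnerRegional, "inner_regional"),
         (aOuterRegional, "outer_regional"), (aRemote, "remote"),
         (aVeryRemote, "very_remote")] with
      | some category => category
      | none => remotenesssFallback.getD state "inner_regional"

-- ===== PORT B =====

-- Source B's module-level _INTERVALS = sorted(...) written out as the sorted literal it evaluates to
def bIntervals : List (Int × Int × String) :=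
  [(800, 832, "major_city"), (870, 899, "remote"), (900, 999, "very_remote"),
   (2000, 2234, "major_city"), (2250, 2310, "inner_regional"), (2320, 2490, "inner_regional"),
   (2500, 2530, "inner_regional"), (2540, 2599, "outer_regional"), (2600, 2618, "major_city"),
   (2700, 2799, "outer_regional"), (2830, 2899, "remote"), (3000, 3207, "major_city"),
   (3211, 3500, "inner_regional"), (3501, 3699, "outer_regional"), (4000, 4179, "major_city"),
   (4205, 4399, "inner_regional"), (4400, 4699, "outer_regional"), (4700, 4899, "remote"),
   (4900, 4999, "very_remote"), (5000, 5199, "major_city"), (5200, 5499, "outer_regional"),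
   (5500, 5799, "remote"), (5800, 5999, "very_remote"), (6000, 6199, "major_city"),
   (6200, 6699, "remote"), (6700, 6999, "very_remote"), (7000, 7049, "major_city"),
   (7050, 7199, "inner_regional")]

def bLows : List Int := bIntervals.map (·.1)

def bFallback : PySem.Dict String String :=
  PySem.Dict.ofList
    [("NSW", "major_city"), ("VIC", "major_city"), ("QLD", "inner_regional"),
     ("WA", "inner_regional"), ("SA", "major_city"), ("TAS", "outer_regional"),
     ("NT", "remote"), ("ACT", "major_city")]

def classify_remoteness_py_alt (postcode : String) (state : String) : String :=
  match PySem.Int.ofStr? postcode with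
  | none => bFallback.getD state "inner_regional"   -- except ValueError
  | some pc =>
      let i := PySem.List.bisectRight bLows pc
      if i > 0 then
        let t := PySem.List.pyGetD bIntervals ((i : Int) - 1) (0, 0, "")
        if pc ≤ t.2.1 then t.2.2
        else bFallback.getD state "inner_regional"
      else bFallback.getD state "inner_regional"

-- ===== PRECONDITION & SPEC =====
def Spec_classify_remoteness_py (postcode : String) (state : String) (out : String) : Prop := out = classify_remoteness_py_alt postcode state
instance (postcode : String) (state : String) (out : String) : Decidable (Spec_classify_remoteness_py postcode state out) := by unfold Spec_classify_remoteness_py; infer_instance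

-- ===== CLAIM (what is proved, stated in full; the proofs are below) =====
def Claim_equal_classify_remoteness_py : Prop := ∀ (postcode : String) (state : String), Dom_classify_remoteness_py postcode state → Spec_classify_remoteness_py postcode state (classify_remoteness_py postcode state)

-- ===== LEMMAS AND PROOFS =====

-- the nested priority scan and the binary-search lookup agree for every integer postcode
set_option maxHeartbeats 2000000 in
theorem core_eq (pc : Int) (state : String) :
    (match aScan pc
        [(aMajorCity, "major_city"), (aInnerRegional, "inner_regional"),
         (aOuterRegional, "outer_regional"), (aRemote, "remote"),
         (aVeryRemote, "very_remote")] with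
      | some category => category
      | none => remotenesssFallback.getD state "inner_regional") =
    (let i := PySem.List.bisectRight bLows pc
      if i > 0 then
        let t := PySem.List.pyGetD bIntervals ((i : Int) - 1) (0, 0, "")
        if pc ≤ t.2.1 then t.2.2
        else bFallback.getD state "inner_regional"
      else bFallback.getD state "inner_regional") := by
  have hspec := PySem.List.bisectRight_spec bLows pc (by decide)
  generalize hgi : PySem.List.bisectRight bLows pc = i at hspec ⊢
  obtain ⟨hle, h1, h2⟩ := hspec
  have hle' : i ≤ 28 := by simpa [bLows, bIntervals] using hle
  clear hle hgi
  interval_cases i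
  ·  -- i = 0
    have hb2 := h2 0 (by decide) (by norm_num)
    norm_num [bLows, bIntervals] at hb2
    simp only [aScan, aInRanges, aMajorCity, aInnerRegional, aOuterRegional, aRemote, aVeryRemote]
    norm_num [PySem.List.pyGetD, PySem.List.pyGet?, PySem.List.pyIdx?, Int.toNat, bIntervals, remotenesssFallback, bFallback]
    split_ifs <;> first | rfl | omega
  ·  -- i = 1
    have hb1 := h1 0 (by decide) (by norm_num)
    have hb2 := h2 1 (by decide) (by norm_num)
    norm_num [bLows, bIntervals] at hb1 hb2
    simp only [aScan, aInRanges, aMajorCity, aInnerRegional, aOuterRegional, aRemote, aVeryRemote]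
    norm_num [PySem.List.pyGetD, PySem.List.pyGet?, PySem.List.pyIdx?, Int.toNat, bIntervals, remotenesssFallback, bFallback]
    split_ifs <;> first | rfl | omega
  ·  -- i = 2
    have hb1 := h1 1 (by decide) (by norm_num)
    have hb2 := h2 2 (by decide) (by norm_num)
    norm_num [bLows, bIntervals] at hb1 hb2
    simp only [aScan, aInRanges, aMajorCity, aInnerRegional, aOuterRegional, aRemote, aVeryRemote]
    norm_num [PySem.List.pyGetD, PySem.List.pyGet?, PySem.List.pyIdx?, Int.toNat, bIntervals, remotenesssFallback, bFallback]
    split_ifs <;> first | rfl | omega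
  ·  -- i = 3
    have hb1 := h1 2 (by decide) (by norm_num)
    have hb2 := h2 3 (by decide) (by norm_num)
    norm_num [bLows, bIntervals] at hb1 hb2
    simp only [aScan, aInRanges, aMajorCity, aInnerRegional, aOuterRegional, aRemote, aVeryRemote]
    norm_num [PySem.List.pyGetD, PySem.List.pyGet?, PySem.List.pyIdx?, Int.toNat, bIntervals, remotenesssFallback, bFallback]
    split_ifs <;> first | rfl | omega
  ·  -- i = 4
    have hb1 := h1 3 (by decide) (by norm_num)
    have hb2 := h2 4 (by decide) (by norm_num)
    norm_num [bLows, bIntervals] at hb1 hb2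
    simp only [aScan, aInRanges, aMajorCity, aInnerRegional, aOuterRegional, aRemote, aVeryRemote]
    norm_num [PySem.List.pyGetD, PySem.List.pyGet?, PySem.List.pyIdx?, Int.toNat, bIntervals, remotenesssFallback, bFallback]
    split_ifs <;> first | rfl | omega
  ·  -- i = 5
    have hb1 := h1 4 (by decide) (by norm_num)
    have hb2 := h2 5 (by decide) (by norm_num)
    norm_num [bLows, bIntervals] at hb1 hb2
    simp only [aScan, aInRanges, aMajorCity, aInnerRegional, aOuterRegional, aRemote, aVeryRemote]
    norm_num [PySem.List.pyGetD, PySem.List.pyGet?, PySem.List.pyIdx?, Int.toNat, bIntervals, remotenesssFallback, bFallback]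
    split_ifs <;> first | rfl | omega
  ·  -- i = 6
    have hb1 := h1 5 (by decide) (by norm_num)
    have hb2 := h2 6 (by decide) (by norm_num)
    norm_num [bLows, bIntervals] at hb1 hb2
    simp only [aScan, aInRanges, aMajorCity, aInnerRegional, aOuterRegional, aRemote, aVeryRemote]
    norm_num [PySem.List.pyGetD, PySem.List.pyGet?, PySem.List.pyIdx?, Int.toNat, bIntervals, remotenesssFallback, bFallback]
    split_ifs <;> first | rfl | omega
  ·  -- i = 7
    have hb1 := h1 6 (by decide) (by norm_num)
    have hb2 := h2 7 (by decide) (by norm_num)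
    norm_num [bLows, bIntervals] at hb1 hb2
    simp only [aScan, aInRanges, aMajorCity, aInnerRegional, aOuterRegional, aRemote, aVeryRemote]
    norm_num [PySem.List.pyGetD, PySem.List.pyGet?, PySem.List.pyIdx?, Int.toNat, bIntervals, remotenesssFallback, bFallback]
    split_ifs <;> first | rfl | omega
  ·  -- i = 8
    have hb1 := h1 7 (by decide) (by norm_num)
    have hb2 := h2 8 (by decide) (by norm_num)
    norm_num [bLows, bIntervals] at hb1 hb2
    simp only [aScan, aInRanges, aMajorCity, aInnerRegional, aOuterRegional, aRemote, aVeryRemote]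
    norm_num [PySem.List.pyGetD, PySem.List.pyGet?, PySem.List.pyIdx?, Int.toNat, bIntervals, remotenesssFallback, bFallback]
    split_ifs <;> first | rfl | omega
  ·  -- i = 9
    have hb1 := h1 8 (by decide) (by norm_num)
    have hb2 := h2 9 (by decide) (by norm_num)
    norm_num [bLows, bIntervals] at hb1 hb2
    simp only [aScan, aInRanges, aMajorCity, aInnerRegional, aOuterRegional, aRemote, aVeryRemote]
    norm_num [PySem.List.pyGetD, PySem.List.pyGet?, PySem.List.pyIdx?, Int.toNat, bIntervals, remotenesssFallback, bFallback]
    split_ifs <;> first | rfl | omega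
  ·  -- i = 10
    have hb1 := h1 9 (by decide) (by norm_num)
    have hb2 := h2 10 (by decide) (by norm_num)
    norm_num [bLows, bIntervals] at hb1 hb2
    simp only [aScan, aInRanges, aMajorCity, aInnerRegional, aOuterRegional, aRemote, aVeryRemote]
    norm_num [PySem.List.pyGetD, PySem.List.pyGet?, PySem.List.pyIdx?, Int.toNat, bIntervals, remotenesssFallback, bFallback]
    split_ifs <;> first | rfl | omega
  ·  -- i = 11
    have hb1 := h1 10 (by decide) (by norm_num)
    have hb2 := h2 11 (by decide) (by norm_num)
    norm_num [bLows, bIntervals] at hb1 hb2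
    simp only [aScan, aInRanges, aMajorCity, aInnerRegional, aOuterRegional, aRemote, aVeryRemote]
    norm_num [PySem.List.pyGetD, PySem.List.pyGet?, PySem.List.pyIdx?, Int.toNat, bIntervals, remotenesssFallback, bFallback]
    split_ifs <;> first | rfl | omega
  ·  -- i = 12
    have hb1 := h1 11 (by decide) (by norm_num)
    have hb2 := h2 12 (by decide) (by norm_num)
    norm_num [bLows, bIntervals] at hb1 hb2
    simp only [aScan, aInRanges, aMajorCity, aInnerRegional, aOuterRegional, aRemote, aVeryRemote]
    norm_num [PySem.List.pyGetD, PySem.List.pyGet?, PySem.List.pyIdx?, Int.toNat, bIntervals, remotenesssFallback, bFallback]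
    split_ifs <;> first | rfl | omega
  ·  -- i = 13
    have hb1 := h1 12 (by decide) (by norm_num)
    have hb2 := h2 13 (by decide) (by norm_num)
    norm_num [bLows, bIntervals] at hb1 hb2
    simp only [aScan, aInRanges, aMajorCity, aInnerRegional, aOuterRegional, aRemote, aVeryRemote]
    norm_num [PySem.List.pyGetD, PySem.List.pyGet?, PySem.List.pyIdx?, Int.toNat, bIntervals, remotenesssFallback, bFallback]
    split_ifs <;> first | rfl | omega
  ·  -- i = 14
    have hb1 := h1 13 (by decide) (by norm_num)
    have hb2 := h2 14 (by decide) (by norm_num)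
    norm_num [bLows, bIntervals] at hb1 hb2
    simp only [aScan, aInRanges, aMajorCity, aInnerRegional, aOuterRegional, aRemote, aVeryRemote]
    norm_num [PySem.List.pyGetD, PySem.List.pyGet?, PySem.List.pyIdx?, Int.toNat, bIntervals, remotenesssFallback, bFallback]
    split_ifs <;> first | rfl | omega
  ·  -- i = 15
    have hb1 := h1 14 (by decide) (by norm_num)
    have hb2 := h2 15 (by decide) (by norm_num)
    norm_num [bLows, bIntervals] at hb1 hb2
    simp only [aScan, aInRanges, aMajorCity, aInnerRegional, aOuterRegional, aRemote, aVeryRemote]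
    norm_num [PySem.List.pyGetD, PySem.List.pyGet?, PySem.List.pyIdx?, Int.toNat, bIntervals, remotenesssFallback, bFallback]
    split_ifs <;> first | rfl | omega
  ·  -- i = 16
    have hb1 := h1 15 (by decide) (by norm_num)
    have hb2 := h2 16 (by decide) (by norm_num)
    norm_num [bLows, bIntervals] at hb1 hb2
    simp only [aScan, aInRanges, aMajorCity, aInnerRegional, aOuterRegional, aRemote, aVeryRemote]
    norm_num [PySem.List.pyGetD, PySem.List.pyGet?, PySem.List.pyIdx?, Int.toNat, bIntervals, remotenesssFallback, bFallback]
    split_ifs <;> first | rfl | omega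
  ·  -- i = 17
    have hb1 := h1 16 (by decide) (by norm_num)
    have hb2 := h2 17 (by decide) (by norm_num)
    norm_num [bLows, bIntervals] at hb1 hb2
    simp only [aScan, aInRanges, aMajorCity, aInnerRegional, aOuterRegional, aRemote, aVeryRemote]
    norm_num [PySem.List.pyGetD, PySem.List.pyGet?, PySem.List.pyIdx?, Int.toNat, bIntervals, remotenesssFallback, bFallback]
    split_ifs <;> first | rfl | omega
  ·  -- i = 18
    have hb1 := h1 17 (by decide) (by norm_num)
    have hb2 := h2 18 (by decide) (by norm_num)
    norm_num [bLows, bIntervals] at hb1 hb2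
    simp only [aScan, aInRanges, aMajorCity, aInnerRegional, aOuterRegional, aRemote, aVeryRemote]
    norm_num [PySem.List.pyGetD, PySem.List.pyGet?, PySem.List.pyIdx?, Int.toNat, bIntervals, remotenesssFallback, bFallback]
    split_ifs <;> first | rfl | omega
  ·  -- i = 19
    have hb1 := h1 18 (by decide) (by norm_num)
    have hb2 := h2 19 (by decide) (by norm_num)
    norm_num [bLows, bIntervals] at hb1 hb2
    simp only [aScan, aInRanges, aMajorCity, aInnerRegional, aOuterRegional, aRemote, aVeryRemote]
    norm_num [PySem.List.pyGetD, PySem.List.pyGet?, PySem.List.pyIdx?, Int.toNat, bIntervals, remotenesssFallback, bFallback]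
    split_ifs <;> first | rfl | omega
  ·  -- i = 20
    have hb1 := h1 19 (by decide) (by norm_num)
    have hb2 := h2 20 (by decide) (by norm_num)
    norm_num [bLows, bIntervals] at hb1 hb2
    simp only [aScan, aInRanges, aMajorCity, aInnerRegional, aOuterRegional, aRemote, aVeryRemote]
    norm_num [PySem.List.pyGetD, PySem.List.pyGet?, PySem.List.pyIdx?, Int.toNat, bIntervals, remotenesssFallback, bFallback]
    split_ifs <;> first | rfl | omega
  ·  -- i = 21
    have hb1 := h1 20 (by decide) (by norm_num)
    have hb2 := h2 21 (by decide) (by norm_num)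
    norm_num [bLows, bIntervals] at hb1 hb2
    simp only [aScan, aInRanges, aMajorCity, aInnerRegional, aOuterRegional, aRemote, aVeryRemote]
    norm_num [PySem.List.pyGetD, PySem.List.pyGet?, PySem.List.pyIdx?, Int.toNat, bIntervals, remotenesssFallback, bFallback]
    split_ifs <;> first | rfl | omega
  ·  -- i = 22
    have hb1 := h1 21 (by decide) (by norm_num)
    have hb2 := h2 22 (by decide) (by norm_num)
    norm_num [bLows, bIntervals] at hb1 hb2
    simp only [aScan, aInRanges, aMajorCity, aInnerRegional, aOuterRegional, aRemote, aVeryRemote]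
    norm_num [PySem.List.pyGetD, PySem.List.pyGet?, PySem.List.pyIdx?, Int.toNat, bIntervals, remotenesssFallback, bFallback]
    split_ifs <;> first | rfl | omega
  ·  -- i = 23
    have hb1 := h1 22 (by decide) (by norm_num)
    have hb2 := h2 23 (by decide) (by norm_num)
    norm_num [bLows, bIntervals] at hb1 hb2
    simp only [aScan, aInRanges, aMajorCity, aInnerRegional, aOuterRegional, aRemote, aVeryRemote]
    norm_num [PySem.List.pyGetD, PySem.List.pyGet?, PySem.List.pyIdx?, Int.toNat, bIntervals, remotenesssFallback, bFallback]
    split_ifs <;> first | rfl | omega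
  ·  -- i = 24
    have hb1 := h1 23 (by decide) (by norm_num)
    have hb2 := h2 24 (by decide) (by norm_num)
    norm_num [bLows, bIntervals] at hb1 hb2
    simp only [aScan, aInRanges, aMajorCity, aInnerRegional, aOuterRegional, aRemote, aVeryRemote]
    norm_num [PySem.List.pyGetD, PySem.List.pyGet?, PySem.List.pyIdx?, Int.toNat, bIntervals, remotenesssFallback, bFallback]
    split_ifs <;> first | rfl | omega
  ·  -- i = 25
    have hb1 := h1 24 (by decide) (by norm_num)
    have hb2 := h2 25 (by decide) (by norm_num)
    norm_num [bLows, bIntervals] at hb1 hb2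
    simp only [aScan, aInRanges, aMajorCity, aInnerRegional, aOuterRegional, aRemote, aVeryRemote]
    norm_num [PySem.List.pyGetD, PySem.List.pyGet?, PySem.List.pyIdx?, Int.toNat, bIntervals, remotenesssFallback, bFallback]
    split_ifs <;> first | rfl | omega
  ·  -- i = 26
    have hb1 := h1 25 (by decide) (by norm_num)
    have hb2 := h2 26 (by decide) (by norm_num)
    norm_num [bLows, bIntervals] at hb1 hb2
    simp only [aScan, aInRanges, aMajorCity, aInnerRegional, aOuterRegional, aRemote, aVeryRemote]
    norm_num [PySem.List.pyGetD, PySem.List.pyGet?, PySem.List.pyIdx?, Int.toNat, bIntervals, remotenesssFallback, bFallback]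
    split_ifs <;> first | rfl | omega
  ·  -- i = 27
    have hb1 := h1 26 (by decide) (by norm_num)
    have hb2 := h2 27 (by decide) (by norm_num)
    norm_num [bLows, bIntervals] at hb1 hb2
    simp only [aScan, aInRanges, aMajorCity, aInnerRegional, aOuterRegional, aRemote, aVeryRemote]
    norm_num [PySem.List.pyGetD, PySem.List.pyGet?, PySem.List.pyIdx?, Int.toNat, bIntervals, remotenesssFallback, bFallback]
    split_ifs <;> first | rfl | omega
  ·  -- i = 28
    have hb1 := h1 27 (by decide) (by norm_num)
    norm_num [bLows, bIntervals] at hb1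
    simp only [aScan, aInRanges, aMajorCity, aInnerRegional, aOuterRegional, aRemote, aVeryRemote]
    norm_num [PySem.List.pyGetD, PySem.List.pyGet?, PySem.List.pyIdx?, Int.toNat, bIntervals, remotenesssFallback, bFallback]
    split_ifs <;> first | rfl | omega

theorem classify_remoteness_py_eq (postcode state : String) :
    classify_remoteness_py postcode state = classify_remoteness_py_alt postcode state := by
  unfold classify_remoteness_py classify_remoteness_py_alt
  cases PySem.Int.ofStr? postcode with
  | none => rfl
  | some pc => exact core_eq pc state

-- ===== VERDICT (by name: the statement is the Claim_ definition above) =====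
theorem classify_remoteness_py_spec : Claim_equal_classify_remoteness_py := by
  intro postcode state _
  unfold Spec_classify_remoteness_py
  exact classify_remoteness_py_eq postcode state
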